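-- pv_equiv track=rewrite | github.com/1025941202-blip/ai-hot-topics | src/ai_hot_topics/dashboard.py | _pick_primary_ref
-- ===== SOURCE A (Python) =====
-- from typing import Any
--
-- def _pick_primary_ref(refs: list[Any], preferred_platform: str = "") -> str | None:
--     normalized_refs = [ref for ref in refs if isinstance(ref, str) and ":" in ref]
--     if not normalized_refs:
--         return None
--     if preferred_platform:
--         for ref in normalized_refs:
--             if ref.startswith(f"{preferred_platform}:"):
--                 return ref
--     for ref in normalized_refs:
--         if ref.startswith("xiaohongshu:"):
--             return ref
--     return normalized_refs[0]
-- ===== SOURCE B (Python) =====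
-- def _pick_primary_ref(refs, preferred_platform=""):
--     normalized_refs = [ref for ref in refs if isinstance(ref, str) and ":" in ref]
--     if not normalized_refs:
--         return None
--
--     def priority(ref):
--         if preferred_platform and ref.startswith(f"{preferred_platform}:"):
--             return 0
--         if ref.startswith("xiaohongshu:"):
--             return 1
--         return 2
--
--     return min(normalized_refs, key=priority)
-- ===== Notes on version B (the rewrite author's own statement) =====
-- stated objective: simpler
-- what changed: Replaces A's cascade of up to three sequential scans (preferred-platform scan, xiaohongshu scan, first element) with a single stable min over a 3-tier priority key; min's first-minimal tie-breaking reproduces A's first-match-wins order.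
import Mathlib
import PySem

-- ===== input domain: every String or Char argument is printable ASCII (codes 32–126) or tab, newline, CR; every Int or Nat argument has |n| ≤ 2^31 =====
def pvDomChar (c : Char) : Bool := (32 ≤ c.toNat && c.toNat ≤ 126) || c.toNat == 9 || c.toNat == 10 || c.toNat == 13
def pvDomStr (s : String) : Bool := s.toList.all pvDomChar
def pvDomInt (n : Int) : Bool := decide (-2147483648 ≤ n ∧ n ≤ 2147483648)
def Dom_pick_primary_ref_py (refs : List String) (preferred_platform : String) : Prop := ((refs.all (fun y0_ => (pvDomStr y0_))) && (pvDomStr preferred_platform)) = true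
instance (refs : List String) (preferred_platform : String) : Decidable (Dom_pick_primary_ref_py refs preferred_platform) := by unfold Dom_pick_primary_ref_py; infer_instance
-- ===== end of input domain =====

-- B replaces A's cascade of up to three sequential scans with one stable min over a
-- 3-tier priority key (simpler); return values are identical on all inputs.

-- ===== PORT A =====
-- literal transliteration: filter, early None, optional preferred scan, xiaohongshu scan, first element
def pick_primary_ref_py (refs : List String) (preferred_platform : String) : Option String :=
  let normalized_refs := refs.filter (fun ref => PySem.Str.isIn ":" ref)
  if normalized_refs = [] then none
  else
    match (if preferred_platform ≠ "" then
             normalized_refs.find? (fun ref => PySem.Str.startswith ref (preferred_platform ++ ":"))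
           else none) with
    | some ref => some ref
    | none =>
      match normalized_refs.find? (fun ref => PySem.Str.startswith ref "xiaohongshu:") with
      | some ref => some ref
      | none => normalized_refs.head?

-- ===== PORT B =====
def pvPriority (preferred_platform ref : String) : Nat :=
  if preferred_platform != "" && PySem.Str.startswith ref (preferred_platform ++ ":") then 0
  else if PySem.Str.startswith ref "xiaohongshu:" then 1
  else 2

def pick_primary_ref_py_alt (refs : List String) (preferred_platform : String) : Option String :=
  let normalized_refs := refs.filter (fun ref => PySem.Str.isIn ":" ref)
  if normalized_refs = [] then none
  else PySem.List.min? normalized_refs (pvPriority preferred_platform)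

-- ===== PRECONDITION & SPEC =====
def Spec_pick_primary_ref_py (refs : List String) (preferred_platform : String) (out : Option String) : Prop := out = pick_primary_ref_py_alt refs preferred_platform
instance (refs : List String) (preferred_platform : String) (out : Option String) : Decidable (Spec_pick_primary_ref_py refs preferred_platform out) := by unfold Spec_pick_primary_ref_py; infer_instance

-- ===== CLAIM (what is proved, stated in full; the proofs are below) =====
def Claim_equal_pick_primary_ref_py : Prop := ∀ (refs : List String) (preferred_platform : String), Dom_pick_primary_ref_py refs preferred_platform → Spec_pick_primary_ref_py refs preferred_platform (pick_primary_ref_py refs preferred_platform)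

-- ===== LEMMAS AND PROOFS =====

-- the step function of PySem.List.min? (first-minimal left fold)
def pvStep (key : String → Nat) (acc : Option String) (x : String) : Option String :=
  match acc with
  | none => some x
  | some m => if key x < key m then some x else some m

lemma pv_min?_eq_foldl (l : List String) (key : String → Nat) :
    PySem.List.min? l key = l.foldl (pvStep key) none := by
  unfold PySem.List.min? pvStep
  congr 1
  funext acc x
  cases acc <;> rfl

lemma pv_foldl_keep (key : String → Nat) (m : String) (xs : List String)
    (h : ∀ y ∈ xs, key m ≤ key y) : xs.foldl (pvStep key) (some m) = some m := by
  induction xs with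
  | nil => rfl
  | cons x t ih =>
    have hx := h x (List.mem_cons_self)
    simp only [List.foldl_cons, pvStep, if_neg (Nat.not_lt.mpr hx)]
    exact ih (fun y hy => h y (List.mem_cons_of_mem _ hy))

lemma pv_min?_first_zero (key : String → Nat) (as bs : List String) (r : String)
    (hr : key r = 0) (has : ∀ y ∈ as, 1 ≤ key y) :
    PySem.List.min? (as ++ r :: bs) key = some r := by
  rw [pv_min?_eq_foldl, List.foldl_append]
  have hstep : List.foldl (pvStep key) (some r) bs = some r :=
    pv_foldl_keep key r bs (fun y _ => by omega)
  cases hm : as.foldl (pvStep key) none with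
  | none => simpa [pvStep] using hstep
  | some m =>
    have hmem : m ∈ as := PySem.List.min?_mem ((pv_min?_eq_foldl as key).trans hm)
    have h1 : key r < key m := by have := has m hmem; omega
    simpa [pvStep, if_pos h1] using hstep

lemma pv_min?_first_one (key : String → Nat) (as bs : List String) (r : String)
    (hr : key r = 1) (hbs : ∀ y ∈ bs, 1 ≤ key y) (has : ∀ y ∈ as, 2 ≤ key y) :
    PySem.List.min? (as ++ r :: bs) key = some r := by
  rw [pv_min?_eq_foldl, List.foldl_append]
  have hstep : List.foldl (pvStep key) (some r) bs = some r :=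
    pv_foldl_keep key r bs (fun y hy => by have := hbs y hy; omega)
  cases hm : as.foldl (pvStep key) none with
  | none => simpa [pvStep] using hstep
  | some m =>
    have hmem : m ∈ as := PySem.List.min?_mem ((pv_min?_eq_foldl as key).trans hm)
    have h1 : key r < key m := by have := has m hmem; omega
    simpa [pvStep, if_pos h1] using hstep

lemma pv_min?_const (key : String → Nat) (l : List String)
    (h : ∀ y ∈ l, key y = 2) : PySem.List.min? l key = l.head? := by
  cases l with
  | nil => rfl
  | cons x t =>
    rw [pv_min?_eq_foldl]
    simp only [List.foldl_cons, pvStep, List.head?]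
    exact pv_foldl_keep key x t (fun y hy => by
      have := h y (List.mem_cons_of_mem _ hy); have := h x List.mem_cons_self; omega)

-- priority facts
lemma pv_priority_zero (pp r : String)
    (h : (pp != "" && PySem.Str.startswith r (pp ++ ":")) = true) : pvPriority pp r = 0 := by
  unfold pvPriority
  rw [if_pos h]

lemma pv_priority_pos (pp r : String)
    (h : (pp != "" && PySem.Str.startswith r (pp ++ ":")) ≠ true) : 1 ≤ pvPriority pp r := by
  unfold pvPriority
  rw [if_neg h]
  split <;> omega

lemma pv_priority_two (pp r : String)
    (h0 : (pp != "" && PySem.Str.startswith r (pp ++ ":")) ≠ true)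
    (h1 : PySem.Str.startswith r "xiaohongshu:" ≠ true) : pvPriority pp r = 2 := by
  unfold pvPriority
  rw [if_neg h0, if_neg h1]

-- the first find? of port A equals find? over the combined tier-0 predicate
lemma pv_find0_eq (l : List String) (pp : String) :
    (if pp ≠ "" then l.find? (fun r => PySem.Str.startswith r (pp ++ ":")) else none)
      = l.find? (fun r => pp != "" && PySem.Str.startswith r (pp ++ ":")) := by
  by_cases hpp : pp = ""
  · subst hpp
    rw [if_neg (by simp)]
    exact (List.find?_eq_none.mpr (by simp)).symm
  · rw [if_pos hpp]
    congr 1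
    funext r
    simp [hpp]

lemma pv_cascade_eq_min (pp : String) (l : List String) :
    l ≠ [] →
    (match (if pp ≠ "" then l.find? (fun r => PySem.Str.startswith r (pp ++ ":")) else none) with
     | some r => some r
     | none =>
       match l.find? (fun r => PySem.Str.startswith r "xiaohongshu:") with
       | some r => some r
       | none => l.head?) = PySem.List.min? l (pvPriority pp) := by
  intro _
  rw [pv_find0_eq]
  cases h0 : l.find? (fun r => pp != "" && PySem.Str.startswith r (pp ++ ":")) with
  | some r =>
    obtain ⟨hpr, as, bs, hsplit, hprev⟩ := List.find?_eq_some_iff_append.mp h0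
    subst hsplit
    rw [pv_min?_first_zero (pvPriority pp) as bs r (pv_priority_zero pp r hpr)
      (fun y hy => pv_priority_pos pp y (by
        have h' := hprev y hy
        intro hc; rw [hc] at h'; simp at h'))]
  | none =>
    have hno0 : ∀ y ∈ l, (pp != "" && PySem.Str.startswith y (pp ++ ":")) ≠ true :=
      List.find?_eq_none.mp h0
    cases h1 : l.find? (fun r => PySem.Str.startswith r "xiaohongshu:") with
    | some r =>
      obtain ⟨hpr, as, bs, hsplit, hprev⟩ := List.find?_eq_some_iff_append.mp h1
      have hno0' : ∀ y ∈ as ++ r :: bs, (pp != "" && PySem.Str.startswith y (pp ++ ":")) ≠ true := by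
        rw [← hsplit]; exact hno0
      rw [hsplit] at *
      rw [pv_min?_first_one (pvPriority pp) as bs r]
      · unfold pvPriority
        rw [if_neg (hno0' r (by simp)), if_pos hpr]
      · exact fun y hy => pv_priority_pos pp y (hno0' y (by simp [hy]))
      · intro y hy
        have h2 := pv_priority_two pp y (hno0' y (by simp [hy])) (by
          have h' := hprev y hy
          intro hc; rw [hc] at h'; simp at h')
        omega
    | none =>
      have hno1 := List.find?_eq_none.mp h1
      rw [pv_min?_const (pvPriority pp) l
        (fun y hy => pv_priority_two pp y (hno0 y hy) (hno1 y hy))]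

-- ===== VERDICT (by name: the statement is the Claim_ definition above) =====
theorem pick_primary_ref_py_spec : Claim_equal_pick_primary_ref_py := by
  intro refs pp _
  unfold Spec_pick_primary_ref_py pick_primary_ref_py pick_primary_ref_py_alt
  set l := refs.filter (fun ref => PySem.Str.isIn ":" ref) with hl
  by_cases h : l = []
  · simp [h]
  · rw [if_neg h, if_neg h]
    exact pv_cascade_eq_min pp l h
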